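-- pv_equiv track=rewrite | github.com/glebo309/glebo309.github.io | word/web-of-biocatalysis/PAPER_DOWNLOADER-copy/src/acquisition/google_scholar.py | _classify_pdf_source
-- ===== SOURCE A (Python) =====
-- from typing import Optional, List, Tuple, Dict, Set
--
-- def _classify_pdf_source(url: str) -> Tuple[str, int]:
--     """
--     Classify PDF source and assign a quality score.
--
--     Returns (source_type, score)
--     """
--     url_lower = url.lower()
--
--     # Universities (highest trust)
--     if any(domain in url_lower for domain in ['.edu', '.ac.uk', '.ac.cn', '.edu.cn',
--                                                 '.edu.au', '.ac.jp', '.edu.br', '.ac.in']):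
--         return 'university', 10
--
--     # Institutional repositories
--     if any(repo in url_lower for repo in ['repository', 'dspace', 'eprints', 'archive']):
--         return 'repository', 9
--
--     # Known academic sites
--     if 'arxiv.org' in url_lower:
--         return 'arxiv', 10
--     elif 'biorxiv.org' in url_lower or 'medrxiv.org' in url_lower:
--         return 'preprint', 9
--     elif 'researchgate.net' in url_lower:
--         return 'researchgate', 6
--     elif 'academia.edu' in url_lower:
--         return 'academia', 5
--     elif 'ssrn.com' in url_lower:
--         return 'ssrn', 8
--     elif 'philpapers.org' in url_lower:
--         return 'philpapers', 8
--     elif 'zenodo.org' in url_lower: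
--         return 'zenodo', 8
--     elif 'figshare.com' in url_lower:
--         return 'figshare', 7
--     elif 'osf.io' in url_lower:
--         return 'osf', 7
--     elif 'hal.' in url_lower:
--         return 'hal', 9
--     elif 'scielo' in url_lower:
--         return 'scielo', 9
--     elif 'cyberleninka' in url_lower:
--         return 'cyberleninka', 8
--
--     # Generic but promising
--     elif any(domain in url_lower for domain in ['.org', '.gov']):
--         return 'organization', 4
--
--     # Unknown but has PDF indicators
--     elif '.pdf' in url_lower:
--         return 'direct_pdf', 3
--
--     return 'unknown', 1
-- ===== SOURCE B (Python) =====
-- # Different strategy: instead of an early-exit priority chain, evaluate EVERY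
-- # rule against the url, collect all matching (priority_rank, result) pairs,
-- # and take min() by rank.  Ranks mirror the original priority order, so the
-- # minimum-rank match is exactly the first rule A would have fired.
-- _RULES = [
--     ('.edu', 0, ('university', 10)), ('.ac.uk', 0, ('university', 10)),
--     ('.ac.cn', 0, ('university', 10)), ('.edu.cn', 0, ('university', 10)),
--     ('.edu.au', 0, ('university', 10)), ('.ac.jp', 0, ('university', 10)),
--     ('.edu.br', 0, ('university', 10)), ('.ac.in', 0, ('university', 10)),
--     ('repository', 1, ('repository', 9)), ('dspace', 1, ('repository', 9)),
--     ('eprints', 1, ('repository', 9)), ('archive', 1, ('repository', 9)),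
--     ('arxiv.org', 2, ('arxiv', 10)),
--     ('biorxiv.org', 3, ('preprint', 9)), ('medrxiv.org', 3, ('preprint', 9)),
--     ('researchgate.net', 4, ('researchgate', 6)),
--     ('academia.edu', 5, ('academia', 5)),
--     ('ssrn.com', 6, ('ssrn', 8)),
--     ('philpapers.org', 7, ('philpapers', 8)),
--     ('zenodo.org', 8, ('zenodo', 8)),
--     ('figshare.com', 9, ('figshare', 7)),
--     ('osf.io', 10, ('osf', 7)),
--     ('hal.', 11, ('hal', 9)),
--     ('scielo', 12, ('scielo', 9)),
--     ('cyberleninka', 13, ('cyberleninka', 8)),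
--     ('.org', 14, ('organization', 4)), ('.gov', 14, ('organization', 4)),
--     ('.pdf', 15, ('direct_pdf', 3)),
-- ]
--
-- def _classify_pdf_source(url: str):
--     u = url.lower()
--     matched = [(rank, res) for (pat, rank, res) in _RULES if pat in u]
--     if not matched:
--         return ('unknown', 1)
--     return min(matched)[1]
-- ===== Notes on version B (the rewrite author's own statement) =====
-- stated objective: alternative
-- what changed: A short-circuits down an if/elif priority chain; B evaluates every flattened (pattern, rank, result) rule against the lowercased url, collects all matches, and returns the result of the minimum-rank match (ranks mirror A's priority order).
import Mathlib
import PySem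

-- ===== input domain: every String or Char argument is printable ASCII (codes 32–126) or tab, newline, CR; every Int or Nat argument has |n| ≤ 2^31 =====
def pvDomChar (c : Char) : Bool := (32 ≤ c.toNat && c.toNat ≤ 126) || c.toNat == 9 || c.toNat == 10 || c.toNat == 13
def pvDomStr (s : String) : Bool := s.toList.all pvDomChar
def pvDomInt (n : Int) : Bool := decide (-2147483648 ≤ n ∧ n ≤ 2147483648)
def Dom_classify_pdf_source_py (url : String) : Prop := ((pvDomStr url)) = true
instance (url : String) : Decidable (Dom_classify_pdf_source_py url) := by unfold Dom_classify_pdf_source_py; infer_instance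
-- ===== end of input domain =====

-- ===== PORT A =====
-- Header: A walks an early-exit if/elif priority chain; B instead tests every flattened
-- (pattern, rank, result) rule, collects all matches and returns the minimum-rank one.
-- Same return value everywhere; objective: alternative (same cost, different strategy).
def classify_pdf_source_py (url : String) : String × Int :=
  let url_lower := PySem.Str.lower url
  if [".edu", ".ac.uk", ".ac.cn", ".edu.cn", ".edu.au", ".ac.jp", ".edu.br", ".ac.in"].any
       (fun domain => PySem.Str.isIn domain url_lower) then ("university", 10)
  else if ["repository", "dspace", "eprints", "archive"].any
       (fun repo => PySem.Str.isIn repo url_lower) then ("repository", 9)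
  else if PySem.Str.isIn "arxiv.org" url_lower then ("arxiv", 10)
  else if PySem.Str.isIn "biorxiv.org" url_lower || PySem.Str.isIn "medrxiv.org" url_lower then ("preprint", 9)
  else if PySem.Str.isIn "researchgate.net" url_lower then ("researchgate", 6)
  else if PySem.Str.isIn "academia.edu" url_lower then ("academia", 5)
  else if PySem.Str.isIn "ssrn.com" url_lower then ("ssrn", 8)
  else if PySem.Str.isIn "philpapers.org" url_lower then ("philpapers", 8)
  else if PySem.Str.isIn "zenodo.org" url_lower then ("zenodo", 8)
  else if PySem.Str.isIn "figshare.com" url_lower then ("figshare", 7)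
  else if PySem.Str.isIn "osf.io" url_lower then ("osf", 7)
  else if PySem.Str.isIn "hal." url_lower then ("hal", 9)
  else if PySem.Str.isIn "scielo" url_lower then ("scielo", 9)
  else if PySem.Str.isIn "cyberleninka" url_lower then ("cyberleninka", 8)
  else if [".org", ".gov"].any (fun domain => PySem.Str.isIn domain url_lower) then ("organization", 4)
  else if PySem.Str.isIn ".pdf" url_lower then ("direct_pdf", 3)
  else ("unknown", 1)

-- ===== PORT B =====
-- _RULES: the flattened (pattern, rank, result) table, ranks mirror A's priority order
def flatRules : List (String × Int × String × Int) :=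
  [ (".edu", 0, "university", 10), (".ac.uk", 0, "university", 10),
    (".ac.cn", 0, "university", 10), (".edu.cn", 0, "university", 10),
    (".edu.au", 0, "university", 10), (".ac.jp", 0, "university", 10),
    (".edu.br", 0, "university", 10), (".ac.in", 0, "university", 10),
    ("repository", 1, "repository", 9), ("dspace", 1, "repository", 9),
    ("eprints", 1, "repository", 9), ("archive", 1, "repository", 9),
    ("arxiv.org", 2, "arxiv", 10),
    ("biorxiv.org", 3, "preprint", 9), ("medrxiv.org", 3, "preprint", 9),
    ("researchgate.net", 4, "researchgate", 6),
    ("academia.edu", 5, "academia", 5),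
    ("ssrn.com", 6, "ssrn", 8),
    ("philpapers.org", 7, "philpapers", 8),
    ("zenodo.org", 8, "zenodo", 8),
    ("figshare.com", 9, "figshare", 7),
    ("osf.io", 10, "osf", 7),
    ("hal.", 11, "hal", 9),
    ("scielo", 12, "scielo", 9),
    ("cyberleninka", 13, "cyberleninka", 8),
    (".org", 14, "organization", 4), (".gov", 14, "organization", 4),
    (".pdf", 15, "direct_pdf", 3) ]

-- Python's min() loop on the (rank, result) pairs; ranks are compared first and
-- equal-rank entries carry equal results, so the rank comparison decides min exactly.
def pyMin (m : Int × String × Int) : List (Int × String × Int) → Int × String × Int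
  | [] => m
  | x :: xs => pyMin (if x.1 < m.1 then x else m) xs

def classify_pdf_source_py_alt (url : String) : String × Int :=
  let u := PySem.Str.lower url
  let matched := (flatRules.filter (fun r => PySem.Str.isIn r.1 u)).map (fun r => r.2)
  match matched with
  | [] => ("unknown", 1)
  | m :: rest => (pyMin m rest).2

-- ===== PRECONDITION & SPEC =====
def Spec_classify_pdf_source_py (url : String) (out : String × Int) : Prop := out = classify_pdf_source_py_alt url
instance (url : String) (out : String × Int) : Decidable (Spec_classify_pdf_source_py url out) := by unfold Spec_classify_pdf_source_py; infer_instance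

-- ===== CLAIM =====
def Claim_equal_classify_pdf_source_py : Prop := ∀ (url : String), Dom_classify_pdf_source_py url → Spec_classify_pdf_source_py url (classify_pdf_source_py url)

-- ===== LEMMAS AND PROOFS =====

-- when every later element has rank ≥ the accumulator's, Python's min keeps the accumulator
lemma pyMin_of_ge (m : Int × String × Int) (l : List (Int × String × Int))
    (h : ∀ x ∈ l, m.1 ≤ x.1) : pyMin m l = m := by
  induction l with
  | nil => rfl
  | cons x xs ih =>
      have hx : m.1 ≤ x.1 := h x (by simp)
      simp only [pyMin, if_neg (by omega : ¬ x.1 < m.1)]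
      exact ih (fun y hy => h y (by simp [hy]))

-- first-match reading of B: walk the list, return the first rule whose pattern occurs
def firstRes (u : String) : List (String × Int × String × Int) → String × Int
  | [] => ("unknown", 1)
  | r :: rest => if PySem.Str.isIn r.1 u then r.2.2 else firstRes u rest

-- on a rank-sorted rule list, filter-then-min equals first-match
lemma minMatch_eq_firstRes (u : String) (l : List (String × Int × String × Int))
    (hs : l.Pairwise (fun a b => a.2.1 ≤ b.2.1)) :
    (match (l.filter (fun r => PySem.Str.isIn r.1 u)).map (fun r => r.2) with
      | [] => (("unknown", 1) : String × Int)
      | m :: rest => (pyMin m rest).2) = firstRes u l := by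
  induction l with
  | nil => rfl
  | cons r rest ih =>
      rw [List.pairwise_cons] at hs
      by_cases h : PySem.Str.isIn r.1 u = true
      · simp only [List.filter_cons, h, if_pos, List.map_cons, firstRes]
        have : pyMin r.2 ((rest.filter (fun r => PySem.Str.isIn r.1 u)).map (fun r => r.2)) = r.2 := by
          apply pyMin_of_ge
          intro x hx
          simp only [List.mem_map, List.mem_filter] at hx
          obtain ⟨y, ⟨hy, _⟩, hxy⟩ := hx
          have := hs.1 y hy
          simpa [← hxy] using this
        rw [this]
      · simp only [List.filter_cons, h, firstRes]
        simpa [h] using ih hs.2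

-- merging a two-way disjunctive guard into two chained ifs
lemma if_or_merge {α : Type} (a b : Bool) (r x : α) :
    (if a || b then r else x) = (if a then r else if b then r else x) := by
  cases a <;> simp

-- ===== VERDICT =====
theorem classify_pdf_source_py_spec : Claim_equal_classify_pdf_source_py := by
  intro url _
  unfold Spec_classify_pdf_source_py classify_pdf_source_py classify_pdf_source_py_alt
  rw [minMatch_eq_firstRes _ _ (by decide)]
  simp only [flatRules, firstRes, List.any_cons, List.any_nil, Bool.or_false, if_or_merge]
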